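-- pv_equiv track=rewrite | github.com/brennanbushee/Advanced-Algorithms | misc/min_attendees.py | min_attendees
-- ===== SOURCE A (Python) =====
-- from collections import Counter
--
-- def min_attendees(answers):
--     # For example, [0,0,1,2], returns {0:2, 1:1, 2:1}.
--     count = Counter(answers)
--     total_attendees = 0
--
--     for x, freq in count.items():
--         group_size = x + 1  # Minimum number of people per group
--         num_groups = (freq + group_size - 1) // group_size  # Ceiling division
--         total_attendees += num_groups * group_size
--
--     return total_attendees
-- ===== SOURCE B (Python) =====
-- def _flush(total, cur, cnt):
--     # close the current run: one summand per run of equal values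
--     if cnt:
--         g = cur + 1
--         return total + ((cnt + g - 1) // g) * g
--     return total
--
--
-- def min_attendees(answers):
--     total, cur, cnt = 0, None, 0
--     for v in sorted(answers):
--         if v == cur:
--             cnt += 1
--         else:
--             total = _flush(total, cur, cnt)
--             cur, cnt = v, 1
--     return _flush(total, cur, cnt)
-- ===== Notes on version B (the rewrite author's own statement) =====
-- stated objective: alternative
-- what changed: Replaces the Counter frequency table with a sort followed by a single run-length scan that flushes one summand at each run boundary.
import Mathlib
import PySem

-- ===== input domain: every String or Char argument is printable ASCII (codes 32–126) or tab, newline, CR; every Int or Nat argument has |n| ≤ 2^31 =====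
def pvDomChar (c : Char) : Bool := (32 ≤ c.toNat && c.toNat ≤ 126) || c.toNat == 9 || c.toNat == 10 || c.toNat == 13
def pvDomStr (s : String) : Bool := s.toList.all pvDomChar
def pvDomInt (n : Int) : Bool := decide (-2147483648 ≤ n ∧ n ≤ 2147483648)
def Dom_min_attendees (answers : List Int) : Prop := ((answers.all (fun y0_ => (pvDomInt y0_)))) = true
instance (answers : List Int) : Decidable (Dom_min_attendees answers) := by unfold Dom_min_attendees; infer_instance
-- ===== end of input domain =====

-- B replaces A's Counter frequency table by a sort followed by a single run-length
-- scan flushing one summand per run boundary (alternative decomposition, same results).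

-- ===== PORT A =====
def min_attendees (answers : List Int) : Int :=
  let count := PySem.Dict.counter answers
  count.items.foldl (fun total_attendees xf =>
    let group_size := xf.1 + 1
    let num_groups := PySem.Int.floordiv (xf.2 + group_size - 1) group_size
    total_attendees + num_groups * group_size) 0

-- ===== PORT B =====
-- close the current run: one summand per run of equal values ('if cnt:' guard of Source B;
-- the 'none' case with cnt ≠ 0 is unreachable: Python's _flush is never called that way)
def pvFlush (total : Int) (cur : Option Int) (cnt : Int) : Int :=
  if cnt ≠ 0 then
    match cur with
    | some c => total + PySem.Int.floordiv (cnt + (c + 1) - 1) (c + 1) * (c + 1)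
    | none => total
  else total

def min_attendees_alt (answers : List Int) : Int :=
  let st := (PySem.List.sorted answers (fun x => x) false).foldl
    (fun (st : Int × Option Int × Int) v =>
      if some v == st.2.1 then (st.1, st.2.1, st.2.2 + 1)
      else (pvFlush st.1 st.2.1 st.2.2, some v, 1))
    ((0 : Int), (none : Option Int), (0 : Int))
  pvFlush st.1 st.2.1 st.2.2

-- ===== PRECONDITION & SPEC =====
-- Pre_ excludes inputs containing -1: there group_size = 0 and both Pythons raise ZeroDivisionError.
def Pre_min_attendees (answers : List Int) : Prop := (-1 : Int) ∉ answers
instance (answers : List Int) : Decidable (Pre_min_attendees answers) := by unfold Pre_min_attendees; infer_instance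

def pvWitness_min_attendees : List Int := [0, 0, 1, 2]

def Spec_min_attendees (answers : List Int) (out : Int) : Prop := out = min_attendees_alt answers
instance (answers : List Int) (out : Int) : Decidable (Spec_min_attendees answers out) := by unfold Spec_min_attendees; infer_instance

-- ===== CLAIM (what is proved, stated in full; the proofs are below) =====
def Claim_equal_min_attendees : Prop := ∀ (answers : List Int), Dom_min_attendees answers → Pre_min_attendees answers → Spec_min_attendees answers (min_attendees answers)

-- ===== LEMMAS AND PROOFS =====


def pvContrib (x c : Int) : Int := PySem.Int.floordiv (c + (x + 1) - 1) (x + 1) * (x + 1)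
def pvG (l : List Int) : Int :=
  ((PySem.List.dedup l).map (fun k => pvContrib k (l.count k))).sum

theorem pvDedup_filter (p : Int → Bool) (t : List Int) :
    PySem.List.dedup (t.filter p) = (PySem.List.dedup t).filter p := by
  induction t with
  | nil => rfl
  | cons a t ih =>
    rw [List.filter_cons]
    by_cases hpa : p a
    · rw [if_pos hpa]
      rw [PySem.List.dedup_eq_ofList, PySem.List.dedup_eq_ofList,
          PySem.Set.ofList_cons, PySem.Set.ofList_cons, PySem.Set.discard, PySem.Set.discard,
          List.filter_cons_of_pos hpa, ← PySem.List.dedup_eq_ofList, ← PySem.List.dedup_eq_ofList,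
          ih, List.filter_comm]
    · rw [if_neg hpa]
      rw [PySem.List.dedup_eq_ofList (a :: t), PySem.Set.ofList_cons, PySem.Set.discard,
          List.filter_cons_of_neg (by simp [hpa]), ← PySem.List.dedup_eq_ofList,
          ih, List.filter_comm]
      refine (List.filter_eq_self.mpr ?_).symm
      intro x hx
      rcases List.mem_filter.mp hx with ⟨-, hpx⟩
      have hxa : x ≠ a := by intro h; subst h; exact hpa hpx
      simpa using hxa

theorem pvDedup_cons (v : Int) (t : List Int) :
    PySem.List.dedup (v :: t) = v :: (PySem.List.dedup t).filter (fun x => x ≠ v) := by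
  rw [PySem.List.dedup_eq_ofList, PySem.Set.ofList_cons, PySem.Set.discard,
      ← PySem.List.dedup_eq_ofList]
  congr 1
  apply List.filter_congr
  intro x _
  by_cases h : x = v
  · subst h; simp
  · simp [h]

theorem pvG_cons (v : Int) (t : List Int) :
    pvG (v :: t) = pvContrib v (1 + (t.count v : Int)) + pvG (t.filter (fun x => x ≠ v)) := by
  unfold pvG
  rw [pvDedup_cons, List.map_cons, List.sum_cons]
  congr 1
  · rw [List.count_cons_self]
    push_cast
    rw [Int.add_comm]
  · rw [pvDedup_filter]
    apply congrArg
    apply List.map_congr_left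
    intro k hk
    rcases List.mem_filter.mp hk with ⟨-, hkv⟩
    have hkv' : k ≠ v := by simpa using hkv
    simp [hkv', Ne.symm hkv', List.count_filter]

theorem pvG_perm {l l' : List Int} (h : l.Perm l') : pvG l = pvG l' := by
  unfold pvG
  have hd : (PySem.List.dedup l).Perm (PySem.List.dedup l') := by
    rw [List.perm_ext_iff_of_nodup (PySem.List.nodup_dedup l) (PySem.List.nodup_dedup l')]
    intro a
    rw [PySem.List.mem_dedup, PySem.List.mem_dedup]
    exact ⟨fun ha => h.mem_iff.mp ha, fun ha => h.mem_iff.mpr ha⟩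
  have hc : ∀ k, l.count k = l'.count k := fun k => h.count_eq k
  calc ((PySem.List.dedup l).map (fun k => pvContrib k (l.count k))).sum
      = ((PySem.List.dedup l).map (fun k => pvContrib k (l'.count k))).sum := by
        apply congrArg; apply List.map_congr_left; intro k _; rw [hc]
    _ = ((PySem.List.dedup l').map (fun k => pvContrib k (l'.count k))).sum :=
        (hd.map _).sum_eq

def pvStep (st : Int × Option Int × Int) (v : Int) : Int × Option Int × Int :=
  if some v == st.2.1 then (st.1, st.2.1, st.2.2 + 1)
  else (pvFlush st.1 st.2.1 st.2.2, some v, 1)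

def pvFinish (st : Int × Option Int × Int) : Int := pvFlush st.1 st.2.1 st.2.2

theorem pvScan_go (s : List Int) (hs : s.Pairwise (· ≤ ·)) :
    ∀ (c T n : Int), 0 < n → (∀ x ∈ s, c ≤ x) →
      pvFinish (s.foldl pvStep (T, some c, n))
      = T + pvContrib c (n + (s.count c : Int)) + pvG (s.filter (fun x => x ≠ c)) := by
  induction s with
  | nil =>
    intro c T n hn _
    simp [pvFinish, pvFlush, pvG, pvContrib, hn.ne', PySem.List.dedup]

  | cons v t ih =>
    intro c T n hn hge
    have hsorted_t : t.Pairwise (· ≤ ·) := (List.pairwise_cons.mp hs).2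
    have hvt : ∀ x ∈ t, v ≤ x := (List.pairwise_cons.mp hs).1
    by_cases hvc : v = c
    · subst hvc
      have hstep : pvStep (T, some v, n) v = (T, some v, n + 1) := by
        simp [pvStep]
      rw [List.foldl_cons, hstep,
          ih hsorted_t v T (n + 1) (by omega) hvt]
      rw [List.count_cons_self, List.filter_cons_of_neg (by simp)]
      push_cast
      have harg : n + 1 + (List.count v t : Int) = n + ((List.count v t : Int) + 1) := by omega
      rw [harg]
    · have hstep : pvStep (T, some c, n) v = (T + pvContrib c n, some v, 1) := by
        simp [pvStep, hvc, pvFlush, hn.ne', pvContrib]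
      have hcv : c < v := lt_of_le_of_ne (hge v (by simp)) (Ne.symm hvc)
      have hct : c ∉ v :: t := by
        intro hc
        rcases List.mem_cons.mp hc with h | h
        · exact hvc h.symm
        · exact absurd (hvt c h) (not_le.mpr hcv)
      rw [List.foldl_cons, hstep,
          ih hsorted_t v (T + pvContrib c n) 1 one_pos hvt]
      have hfilter : (v :: t).filter (fun x => decide (x ≠ c)) = v :: t :=
        List.filter_eq_self.mpr (fun x hx => by
          have hxc : x ≠ c := fun h => hct (h ▸ hx)
          simpa using hxc)
      rw [List.count_eq_zero.mpr hct, hfilter, pvG_cons]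
      push_cast
      ring_nf


theorem pvAlt_eq_finish (answers : List Int) :
    min_attendees_alt answers
      = pvFinish ((PySem.List.sorted answers (fun x => x) false).foldl pvStep (0, none, 0)) := rfl

-- A's fold over Counter items equals pvG
theorem pvA_eq (answers : List Int) : min_attendees answers = pvG answers := by
  simp only [min_attendees, PySem.Dict.items_counter]
  rw [PySem.List.foldl_add (g := fun xf : Int × Int =>
    PySem.Int.floordiv (xf.2 + (xf.1 + 1) - 1) (xf.1 + 1) * (xf.1 + 1))]
  simp [pvG, pvContrib, List.map_map, PySem.List.dedup_eq_ofList, Function.comp_def]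

-- B's sorted run scan equals pvG
theorem pvB_eq (answers : List Int) : min_attendees_alt answers = pvG answers := by
  rw [pvAlt_eq_finish, ← pvG_perm (PySem.List.sorted_perm answers (fun x => x) false)]
  have hpair : (PySem.List.sorted answers (fun x => x) false).Pairwise (· ≤ ·) :=
    PySem.List.sorted_pairwise answers (fun x => x)
  generalize hs : PySem.List.sorted answers (fun x => x) false = s at hpair ⊢
  cases s with
  | nil => simp [pvFinish, pvFlush, pvG, PySem.List.dedup]
  | cons c t =>
    have hstep0 : pvStep (0, none, 0) c = (0, some c, 1) := by simp [pvStep, pvFlush]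
    rw [List.foldl_cons, hstep0,
        pvScan_go t (List.pairwise_cons.mp hpair).2 c 0 1 one_pos (List.pairwise_cons.mp hpair).1,
        pvG_cons]
    ring_nf



-- ===== VERDICT (by name: the statement is the Claim_ definition above) =====
theorem min_attendees_spec : Claim_equal_min_attendees := by
  intro answers _ _
  unfold Spec_min_attendees
  rw [pvA_eq, pvB_eq]
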